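-- pv_equiv track=rewrite | github.com/sjt8/propeljuly2023 | Assignment3/q1.py | sort_odd_even
-- ===== SOURCE A (Python) =====
-- def sort_odd_even(list_num):
--     list_num.sort()
--     list_odd = []
--     list_even = []
--
--     for i in list_num:
--         if i % 2 == 0:
--             list_even.append(i)
--         else:
--             list_odd.append(i)
--
--     return list_odd + list_even
-- ===== SOURCE B (Python) =====
-- def sort_odd_even(list_num):
--     list_num.sort()
--     return sorted(list_num, key=lambda x: x % 2 == 0)
-- ===== Notes on version B (the rewrite author's own statement) =====
-- stated objective: idiomatic
-- what changed: Replaces the explicit partition loop with two append lists and a concatenation by a single parity-keyed stable sort (sorted with key x % 2 == 0), whose stability places odds before evens in ascending order.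
import Mathlib
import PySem

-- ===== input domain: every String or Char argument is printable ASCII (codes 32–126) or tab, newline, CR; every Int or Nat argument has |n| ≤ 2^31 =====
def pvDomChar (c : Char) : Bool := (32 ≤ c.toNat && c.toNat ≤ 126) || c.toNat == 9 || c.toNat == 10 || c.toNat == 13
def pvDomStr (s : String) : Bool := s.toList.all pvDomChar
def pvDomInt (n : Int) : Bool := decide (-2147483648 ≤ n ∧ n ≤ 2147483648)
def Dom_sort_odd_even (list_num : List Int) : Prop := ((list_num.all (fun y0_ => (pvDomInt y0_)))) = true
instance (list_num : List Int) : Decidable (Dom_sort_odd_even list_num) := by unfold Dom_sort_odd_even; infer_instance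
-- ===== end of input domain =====

-- B replaces A's explicit partition loop by a single parity-keyed stable sort; both
-- Pythons sort the argument in place first (same mutation); equivalence is about the return value.

-- ===== PORT A =====
def sort_odd_even (list_num : List Int) : List Int :=
  let s := PySem.List.sorted list_num (fun x => x) false
  let p := s.foldl
    (fun (acc : List Int × List Int) i =>
      if PySem.Int.mod i 2 = 0 then (acc.1, acc.2 ++ [i]) else (acc.1 ++ [i], acc.2))
    ([], [])
  p.1 ++ p.2

-- ===== PORT B =====
def sort_odd_even_alt (list_num : List Int) : List Int :=
  let s := PySem.List.sorted list_num (fun x => x) false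
  PySem.List.sorted s (fun x => decide (PySem.Int.mod x 2 = 0)) false

-- ===== PRECONDITION & SPEC =====
def Spec_sort_odd_even (list_num : List Int) (out : List Int) : Prop := out = sort_odd_even_alt list_num
instance (list_num : List Int) (out : List Int) : Decidable (Spec_sort_odd_even list_num out) := by unfold Spec_sort_odd_even; infer_instance

-- ===== CLAIM (what is proved, stated in full; the proofs are below) =====
def Claim_equal_sort_odd_even : Prop := ∀ (list_num : List Int), Dom_sort_odd_even list_num → Spec_sort_odd_even list_num (sort_odd_even list_num)

-- ===== LEMMAS AND PROOFS =====

-- Stable insert with a Bool key: an element whose key is true goes to the very end.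
lemma insertBy_key_true {α : Type} (k : α → Bool) (x : α) (hx : k x = true) :
    ∀ (L : List α),
      PySem.List.insertBy (fun a b => decide ((k a : Bool) < k b)) x L = L ++ [x] := by
  intro L
  induction L with
  | nil => rfl
  | cons y ys ih =>
    have h : decide ((k x : Bool) < k y) = false := by
      simp [hx, Bool.lt_iff]
    simp [PySem.List.insertBy, h, ih]

-- Stable insert with a Bool key: a false-keyed element passes the false block and sits
-- just before the true block.
lemma insertBy_key_false {α : Type} (k : α → Bool) (x : α) (hx : k x = false) :
    ∀ (F T : List α), (∀ a ∈ F, k a = false) → (∀ a ∈ T, k a = true) →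
      PySem.List.insertBy (fun a b => decide ((k a : Bool) < k b)) x (F ++ T)
        = F ++ x :: T := by
  intro F T hF hT
  induction F with
  | nil =>
    cases T with
    | nil => rfl
    | cons y ys =>
      have h : decide ((k x : Bool) < k y) = true := by
        simp [hx, hT y (by simp), Bool.lt_iff]
      simp [PySem.List.insertBy, h]
  | cons y ys ih =>
    have hy := hF y (by simp)
    have h : decide ((k x : Bool) < k y) = false := by
      simp [hx, hy]
    simp [PySem.List.insertBy, h, ih (fun a ha => hF a (by simp [ha]))]

-- Stable sort with a Boolean key = the false-keyed block followed by the true-keyed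
-- block, each in original order (accumulator-generalised form of the fold).
lemma foldl_insertBy_key {α : Type} (k : α → Bool) :
    ∀ (xs F T : List α), (∀ a ∈ F, k a = false) → (∀ a ∈ T, k a = true) →
      xs.foldl (fun acc x => PySem.List.insertBy (fun a b => decide ((k a : Bool) < k b)) x acc) (F ++ T)
        = (F ++ xs.filter (fun x => !k x)) ++ (T ++ xs.filter k) := by
  intro xs
  induction xs with
  | nil => intro F T _ _; simp
  | cons x xs ih =>
    intro F T hF hT
    by_cases hx : k x = true
    · have step : PySem.List.insertBy (fun a b => decide ((k a : Bool) < k b)) x (F ++ T)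
          = F ++ (T ++ [x]) := by
        rw [insertBy_key_true k x hx, List.append_assoc]
      have hT' : ∀ a ∈ T ++ [x], k a = true := by
        intro a ha; rcases List.mem_append.1 ha with h | h
        · exact hT a h
        · simp at h; subst h; exact hx
      simp only [List.foldl_cons, step, ih F (T ++ [x]) hF hT', List.filter_cons, hx]
      simp
    · have hx' : k x = false := by simpa using hx
      have step : PySem.List.insertBy (fun a b => decide ((k a : Bool) < k b)) x (F ++ T)
          = (F ++ [x]) ++ T := by
        rw [insertBy_key_false k x hx' F T hF hT, List.append_assoc]; rfl
      have hF' : ∀ a ∈ F ++ [x], k a = false := by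
        intro a ha; rcases List.mem_append.1 ha with h | h
        · exact hF a h
        · simp at h; subst h; exact hx'
      simp only [List.foldl_cons, step, ih (F ++ [x]) T hF' hT, List.filter_cons, hx']
      simp

lemma sorted_bool_key {α : Type} (k : α → Bool) (xs : List α) :
    PySem.List.sorted xs k false = xs.filter (fun x => !k x) ++ xs.filter k := by
  have := foldl_insertBy_key k xs [] [] (by simp) (by simp)
  simpa [PySem.List.sorted] using this

-- A's partition fold, generalised over the two accumulators.
lemma partition_foldl (s : List Int) :
    ∀ (o e : List Int),
      s.foldl
        (fun (acc : List Int × List Int) i =>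
          if PySem.Int.mod i 2 = 0 then (acc.1, acc.2 ++ [i]) else (acc.1 ++ [i], acc.2))
        (o, e)
      = (o ++ s.filter (fun i => !decide (PySem.Int.mod i 2 = 0)),
         e ++ s.filter (fun i => decide (PySem.Int.mod i 2 = 0))) := by
  induction s with
  | nil => intro o e; simp
  | cons i s ih =>
    intro o e
    by_cases hi : PySem.Int.mod i 2 = 0
    · rw [List.foldl_cons, if_pos hi, ih]
      simp only [List.filter_cons, hi, decide_true, Bool.not_true, if_false, if_true,
        List.append_assoc, List.singleton_append, Bool.false_eq_true]
    · rw [List.foldl_cons, if_neg hi, ih]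
      simp only [List.filter_cons, decide_eq_false hi, Bool.not_false, if_true, if_false,
        List.append_assoc, List.singleton_append, Bool.false_eq_true]

-- ===== VERDICT (by name: the statement is the Claim_ definition above) =====
theorem sort_odd_even_spec : Claim_equal_sort_odd_even := by
  intro list_num _
  unfold Spec_sort_odd_even
  dsimp only [sort_odd_even, sort_odd_even_alt]
  rw [sorted_bool_key, partition_foldl]
  simp
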